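-- pv_equiv track=rewrite | github.com/LeKhang97/BiHC | src/Functions.py | make_canonical_seq
-- ===== SOURCE A (Python) =====
-- def make_canonical_seq(res_nums, res_names):
--     """
--     Given a list of residue numbers and names, return a canonical sequence string with '-' for gaps.
--     """
--     if not res_nums or not res_names:
--         return ''
--     # Sort both by residue number
--     pairs = sorted(zip(res_nums, res_names), key=lambda x: x[0])
--     seq = []
--     prev_num = pairs[0][0] - 1
--     for num, name in pairs:
--         gap = num - prev_num - 1
--         if gap > 0:
--             seq.append('-' * gap)
--         seq.append(MODIFIED_BASES.get(name.upper(), name.upper()))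
--         prev_num = num
--     return ''.join(seq)
--
-- MODIFIED_BASES = {
--     # Canonical bases
--     'A': 'A', 'G': 'G', 'C': 'C', 'U': 'U', 'T': 'T',
--     'DA': 'A', 'DG': 'G', 'DC': 'C', 'DT': 'T', 'DI': 'I',
--
--     # Modified adenosines
--     '1MA': 'A',  # 1-methyladenosine
--     '2MA': 'A',  # 2-methyladenosine
--     '6MA': 'A',  # N6-methyladenosine
--     'M2A': 'A',  # 2-methyladenosine
--     'I': 'A',    # Inosine (sometimes mapped to A)
--     'A2M': 'A',  # 2,2-dimethyladenosine
--     'M6A': 'A',  # N6-methyladenosine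
--     'MIA': 'A',  # N6-isopentenyladenosine
--     'RIA': 'A',  # N6-(Ribosylcarboxyamino)adenosine
--     'MA6': 'A',   # N6-methyladenosine
--
--     # Modified cytidines
--     '5MC': 'C',  # 5-methylcytidine
--     'OMC': 'C',  # 2'-O-methylcytidine
--     'CBR': 'C',  # 5-bromocytidine
--     'CBV': 'C',  # 5-bromovinylcytidine
--     'CCC': 'C',  # 5-carboxycytidine
--     'M5C': 'C',  # 5-methylcytosine
--     'RCY': 'C',  # 5-carboxymethylaminomethylcytidine
--     'MCT': 'C',  # 5-methylcytidine
--     '4AC': 'C',   # 4-acetylcytidine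
--
--     # Modified guanosines
--     'M2G': 'G',  # N2-methylguanosine
--     '7MG': 'G',  # 7-methylguanosine
--     'OMG': 'G',  # 2'-O-methylguanosine
--     '2MG': 'G',  # N2,7-dimethylguanosine
--     'G7M': 'G',  # 7-methylguanosine
--     'Y': 'G',    # Wybutosine (sometimes mapped to G)
--     'YG': 'G',   # Wybutosine
--     'GFM': 'G',  # 2′-O-(2-methylthio)guanosine
--
--     # Modified uridines
--     '5MU': 'U',  # 5-methyluridine
--     'H2U': 'U',  # 5,6-dihydrouridine
--     'PSU': 'U',  # Pseudouridine
--     'OMU': 'U',  # 2'-O-methyluridine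
--     'M2U': 'U',  # 2-methyluridine
--     'D': 'U',    # Dihydrouridine (alternate)
--     'S4U': 'U',  # 4-thiouridine
--     '4SU': 'U',  # 4-thiouridine
--     'MSE': 'U',  # 2-selenouridine
--
--     # Modified thymidines
--     'T6A': 'T',  # N6-threonylcarbamoyladenosine (sometimes T, sometimes A)
--     '5MT': 'T',  # 5-methylthymidine
--
--     # Others (rare or synthetic bases)
--     'X': 'N',    # Unknown base
--     'N': 'N',    # Any base
--
--     # For completeness (common in DNA structures)
--     'ADE': 'A', 'GUA': 'G', 'CYT': 'C', 'THY': 'T', 'URA': 'U',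
--
--     'B8N': 'G',   # 7,8-dihydro-8-oxoguanosine
--     '6MZ': 'A',   # N6,N6-dimethyladenosine
--     'UY1': 'U',   # 5-methoxyuridine
--     'UR3': 'U',   # 3-(3-amino-3-carboxypropyl)uridine
--     'GTP': 'G',   # Guanosine triphosphate
--     'JMH': 'A',   # 2'-O-methyladenosine
--     'C4J': 'C',   # N4-acetylcytidine
--     'XSX': 'U',
--     'JMC': 'C',
--     'B8H': 'G',
--
-- }
-- ===== SOURCE B (Python) =====
-- # Inverted lookup table: canonical letter -> the residue names that map to it.
-- CANONICAL_GROUPS = [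
--     ('A', ('A', 'DA', '1MA', '2MA', '6MA', 'M2A', 'I', 'A2M', 'M6A', 'MIA', 'RIA', 'MA6', 'ADE', '6MZ', 'JMH')),
--     ('G', ('G', 'DG', 'M2G', '7MG', 'OMG', '2MG', 'G7M', 'Y', 'YG', 'GFM', 'GUA', 'B8N', 'GTP', 'B8H')),
--     ('C', ('C', 'DC', '5MC', 'OMC', 'CBR', 'CBV', 'CCC', 'M5C', 'RCY', 'MCT', '4AC', 'CYT', 'C4J', 'JMC')),
--     ('U', ('U', '5MU', 'H2U', 'PSU', 'OMU', 'M2U', 'D', 'S4U', '4SU', 'MSE', 'URA', 'UY1', 'UR3', 'XSX')),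
--     ('T', ('T', 'DT', 'T6A', '5MT', 'THY')),
--     ('I', ('DI',)),
--     ('N', ('X', 'N')),
-- ]
--
--
-- def _canonical(name):
--     u = name.upper()
--     for letter, names in CANONICAL_GROUPS:
--         if u in names:
--             return letter
--     return u
--
--
-- def make_canonical_seq(res_nums, res_names):
--     """
--     Given a list of residue numbers and names, return a canonical sequence string with '-' for gaps.
--     """
--     if not res_nums or not res_names:
--         return ''
--     # Group names by residue number (insertion order preserved), no sorting needed.
--     groups = {}
--     for num, name in zip(res_nums, res_names):
--         groups[num] = groups.get(num, []) + [name]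
--     lo = min(groups)
--     hi = max(groups)
--     out = []
--     for p in range(lo, hi + 1):
--         if p in groups:
--             for name in groups[p]:
--                 out.append(_canonical(name))
--         else:
--             out.append('-')
--     return ''.join(out)
-- ===== Notes on version B (the rewrite author's own statement) =====
-- stated objective: alternative
-- what changed: Replaces sort-then-scan-with-gap-arithmetic and the flat name->base dict by a one-pass grouping of names per residue number, a direct scan over range(min,max+1) emitting one dash per missing position, and an inverted letter->names lookup table.
import Mathlib
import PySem

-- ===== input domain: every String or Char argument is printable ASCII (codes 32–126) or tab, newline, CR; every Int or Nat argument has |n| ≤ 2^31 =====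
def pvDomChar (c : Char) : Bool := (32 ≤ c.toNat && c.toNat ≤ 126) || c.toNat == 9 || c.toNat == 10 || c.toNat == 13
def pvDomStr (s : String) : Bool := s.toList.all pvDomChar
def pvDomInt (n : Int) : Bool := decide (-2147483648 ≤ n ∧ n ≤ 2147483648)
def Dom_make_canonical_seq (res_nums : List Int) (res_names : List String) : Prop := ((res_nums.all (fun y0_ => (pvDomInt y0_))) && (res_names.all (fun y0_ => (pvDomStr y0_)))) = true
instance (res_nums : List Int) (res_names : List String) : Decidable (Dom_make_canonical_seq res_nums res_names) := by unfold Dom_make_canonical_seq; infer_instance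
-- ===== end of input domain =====

-- B replaces A's sort-then-scan-with-gap-arithmetic and A's flat name->base dict by a one-pass
-- grouping of names per residue number, a direct scan of range(min, max+1) emitting one '-' per
-- gap position, and an inverted letter->names lookup table (objective: alternative; same value).

-- ===== PORT A =====

def MODIFIED_BASES : PySem.Dict String String := PySem.Dict.ofList [
  ("A", "A"), ("G", "G"), ("C", "C"), ("U", "U"), ("T", "T"), ("DA", "A"), ("DG", "G"), ("DC", "C"), ("DT", "T"), ("DI", "I"), ("1MA", "A"), ("2MA", "A"), ("6MA", "A"), ("M2A", "A"), ("I", "A"), ("A2M", "A"), ("M6A", "A"), ("MIA", "A"), ("RIA", "A"), ("MA6", "A"), ("5MC", "C"), ("OMC", "C"), ("CBR", "C"), ("CBV", "C"), ("CCC", "C"), ("M5C", "C"), ("RCY", "C"), ("MCT", "C"), ("4AC", "C"), ("M2G", "G"), ("7MG", "G"), ("OMG", "G"), ("2MG", "G"), ("G7M", "G"), ("Y", "G"), ("YG", "G"), ("GFM", "G"), ("5MU", "U"), ("H2U", "U"), ("PSU", "U"), ("OMU", "U"), ("M2U", "U"), ("D", "U"), ("S4U", "U"), ("4SU", "U"),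 ("MSE", "U"), ("T6A", "T"), ("5MT", "T"), ("X", "N"), ("N", "N"), ("ADE", "A"), ("GUA", "G"), ("CYT", "C"), ("THY", "T"), ("URA", "U"), ("B8N", "G"), ("6MZ", "A"), ("UY1", "U"), ("UR3", "U"), ("GTP", "G"), ("JMH", "A"), ("C4J", "C"), ("XSX", "U"), ("JMC", "C"), ("B8H", "G")]


-- '-' * gap : hand port of string repetition (exact for gap >= 0; only used under gap > 0)
def mcsDashes (gap : Int) : String := String.ofList (List.replicate gap.toNat '-')

-- the body of A's for-loop: state = (seq, prev_num)
def mcsStep (st : List String × Int) (x : Int × String) : List String × Int :=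
  let gap := x.1 - st.2 - 1
  ((if gap > 0 then st.1 ++ [mcsDashes gap] else st.1)
    ++ [ MODIFIED_BASES.getD (PySem.Str.upper x.2) (PySem.Str.upper x.2)], x.1)

def make_canonical_seq (res_nums : List Int) (res_names : List String) : String :=
  if res_nums = [] ∨ res_names = [] then "" else
    let pairs := PySem.List.sorted (res_nums.zip res_names) (fun x => x.1) false
    let prev0 := (PySem.List.pyGetD pairs 0 (0, "")).1 - 1
    let fin := pairs.foldl mcsStep ([], prev0)
    PySem.Str.join "" fin.1

-- ===== PORT B =====
-- CANONICAL_GROUPS: the inverted table, letter -> names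
def mcsAltTable : List (String × List String) := [
  ("A", ["A", "DA", "1MA", "2MA", "6MA", "M2A", "I", "A2M", "M6A", "MIA", "RIA", "MA6", "ADE", "6MZ", "JMH"]),
  ("G", ["G", "DG", "M2G", "7MG", "OMG", "2MG", "G7M", "Y", "YG", "GFM", "GUA", "B8N", "GTP", "B8H"]),
  ("C", ["C", "DC", "5MC", "OMC", "CBR", "CBV", "CCC", "M5C", "RCY", "MCT", "4AC", "CYT", "C4J", "JMC"]),
  ("U", ["U", "5MU", "H2U", "PSU", "OMU", "M2U", "D", "S4U", "4SU", "MSE", "URA", "UY1", "UR3", "XSX"]),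
  ("T", ["T", "DT", "T6A", "5MT", "THY"]),
  ("I", ["DI"]),
  ("N", ["X", "N"])]

def mcsAltCanon (name : String) : String :=
  let u := PySem.Str.upper name
  ((mcsAltTable.find? (fun g => g.2.contains u)).map Prod.fst).getD u

def make_canonical_seq_alt (res_nums : List Int) (res_names : List String) : String :=
  if res_nums = [] ∨ res_names = [] then "" else
    -- groups[num] = groups.get(num, []) + [name]
    let groups := (res_nums.zip res_names).foldl
      (fun (d : PySem.Dict Int (List String)) x => d.modify x.1 [] (· ++ [x.2])) PySem.Dict.empty
    let lo := (PySem.List.min? groups.keys (fun k => k)).getD 0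
    let hi := (PySem.List.max? groups.keys (fun k => k)).getD 0
    let out := (PySem.List.pyRange lo (hi + 1) 1).foldl
      (fun acc p => if groups.contains p then
          acc ++ (groups.getD p []).map (fun name => mcsAltCanon name)
        else acc ++ ["-"]) []
    PySem.Str.join "" out

-- ===== PRECONDITION & SPEC =====
def Spec_make_canonical_seq (res_nums : List Int) (res_names : List String) (out : String) : Prop := out = make_canonical_seq_alt res_nums res_names
instance (res_nums : List Int) (res_names : List String) (out : String) : Decidable (Spec_make_canonical_seq res_nums res_names out) := by unfold Spec_make_canonical_seq; infer_instance

-- ===== CLAIM (what is proved, stated in full; the proofs are below) =====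
def Claim_equal_make_canonical_seq : Prop := ∀ (res_nums : List Int) (res_names : List String), Dom_make_canonical_seq res_nums res_names → Spec_make_canonical_seq res_nums res_names (make_canonical_seq res_nums res_names)

-- ===== LEMMAS AND PROOFS =====

-- abbreviates A's inline conversion expression
def mcsBase (name : String) : String :=
  MODIFIED_BASES.getD (PySem.Str.upper name) (PySem.Str.upper name)

-- MODIFIED_BASES has pairwise-distinct keys, so ofList is the raw literal
set_option maxRecDepth 100000 in
set_option maxHeartbeats 2000000 in
theorem mcsMB_eq : MODIFIED_BASES = PySem.Dict.mk [
  ("A", "A"), ("G", "G"), ("C", "C"), ("U", "U"), ("T", "T"), ("DA", "A"), ("DG", "G"), ("DC", "C"), ("DT", "T"), ("DI", "I"), ("1MA", "A"), ("2MA", "A"), ("6MA", "A"), ("M2A", "A"), ("I", "A"), ("A2M", "A"), ("M6A", "A"), ("MIA", "A"), ("RIA", "A"), ("MA6", "A"), ("5MC", "C"), ("OMC", "C"), ("CBR", "C"), ("CBV", "C"), ("CCC", "C"), ("M5C", "C"), ("RCY", "C"), ("MCT", "C"), ("4AC", "C"), ("M2G", "G"), ("7MG", "G"), ("OMG", "G"),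 ("2MG", "G"), ("G7M", "G"), ("Y", "G"), ("YG", "G"), ("GFM", "G"), ("5MU", "U"), ("H2U", "U"), ("PSU", "U"), ("OMU", "U"), ("M2U", "U"), ("D", "U"), ("S4U", "U"), ("4SU", "U"), ("MSE", "U"), ("T6A", "T"), ("5MT", "T"), ("X", "N"), ("N", "N"), ("ADE", "A"), ("GUA", "G"), ("CYT", "C"), ("THY", "T"), ("URA", "U"), ("B8N", "G"), ("6MZ", "A"), ("UY1", "U"), ("UR3", "U"), ("GTP", "G"), ("JMH", "A"), ("C4J", "C"), ("XSX", "U"), ("JMC", "C"), ("B8H", "G")] := by decide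

-- B's inverted-table lookup computes A's dict lookup, for every string
set_option maxRecDepth 100000 in
set_option maxHeartbeats 2000000 in
theorem mcsAltLookup_eq (u : String) :
    ((mcsAltTable.find? (fun g => g.2.contains u)).map Prod.fst).getD u
      = MODIFIED_BASES.getD u u := by
  by_cases h1 : u = "A"
  · subst h1; decide
  by_cases h2 : u = "G"
  · subst h2; decide
  by_cases h3 : u = "C"
  · subst h3; decide
  by_cases h4 : u = "U"
  · subst h4; decide
  by_cases h5 : u = "T"
  · subst h5; decide
  by_cases h6 : u = "DA"
  · subst h6; decide
  by_cases h7 : u = "DG"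
  · subst h7; decide
  by_cases h8 : u = "DC"
  · subst h8; decide
  by_cases h9 : u = "DT"
  · subst h9; decide
  by_cases h10 : u = "DI"
  · subst h10; decide
  by_cases h11 : u = "1MA"
  · subst h11; decide
  by_cases h12 : u = "2MA"
  · subst h12; decide
  by_cases h13 : u = "6MA"
  · subst h13; decide
  by_cases h14 : u = "M2A"
  · subst h14; decide
  by_cases h15 : u = "I"
  · subst h15; decide
  by_cases h16 : u = "A2M"
  · subst h16; decide
  by_cases h17 : u = "M6A"
  · subst h17; decide
  by_cases h18 : u = "MIA"
  · subst h18; decide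
  by_cases h19 : u = "RIA"
  · subst h19; decide
  by_cases h20 : u = "MA6"
  · subst h20; decide
  by_cases h21 : u = "5MC"
  · subst h21; decide
  by_cases h22 : u = "OMC"
  · subst h22; decide
  by_cases h23 : u = "CBR"
  · subst h23; decide
  by_cases h24 : u = "CBV"
  · subst h24; decide
  by_cases h25 : u = "CCC"
  · subst h25; decide
  by_cases h26 : u = "M5C"
  · subst h26; decide
  by_cases h27 : u = "RCY"
  · subst h27; decide
  by_cases h28 : u = "MCT"
  · subst h28; decide
  by_cases h29 : u = "4AC"
  · subst h29; decide
  by_cases h30 : u = "M2G"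
  · subst h30; decide
  by_cases h31 : u = "7MG"
  · subst h31; decide
  by_cases h32 : u = "OMG"
  · subst h32; decide
  by_cases h33 : u = "2MG"
  · subst h33; decide
  by_cases h34 : u = "G7M"
  · subst h34; decide
  by_cases h35 : u = "Y"
  · subst h35; decide
  by_cases h36 : u = "YG"
  · subst h36; decide
  by_cases h37 : u = "GFM"
  · subst h37; decide
  by_cases h38 : u = "5MU"
  · subst h38; decide
  by_cases h39 : u = "H2U"
  · subst h39; decide
  by_cases h40 : u = "PSU"
  · subst h40; decide
  by_cases h41 : u = "OMU"
  · subst h41; decide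
  by_cases h42 : u = "M2U"
  · subst h42; decide
  by_cases h43 : u = "D"
  · subst h43; decide
  by_cases h44 : u = "S4U"
  · subst h44; decide
  by_cases h45 : u = "4SU"
  · subst h45; decide
  by_cases h46 : u = "MSE"
  · subst h46; decide
  by_cases h47 : u = "T6A"
  · subst h47; decide
  by_cases h48 : u = "5MT"
  · subst h48; decide
  by_cases h49 : u = "X"
  · subst h49; decide
  by_cases h50 : u = "N"
  · subst h50; decide
  by_cases h51 : u = "ADE"
  · subst h51; decide
  by_cases h52 : u = "GUA"
  · subst h52; decide
  by_cases h53 : u = "CYT"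
  · subst h53; decide
  by_cases h54 : u = "THY"
  · subst h54; decide
  by_cases h55 : u = "URA"
  · subst h55; decide
  by_cases h56 : u = "B8N"
  · subst h56; decide
  by_cases h57 : u = "6MZ"
  · subst h57; decide
  by_cases h58 : u = "UY1"
  · subst h58; decide
  by_cases h59 : u = "UR3"
  · subst h59; decide
  by_cases h60 : u = "GTP"
  · subst h60; decide
  by_cases h61 : u = "JMH"
  · subst h61; decide
  by_cases h62 : u = "C4J"
  · subst h62; decide
  by_cases h63 : u = "XSX"
  · subst h63; decide
  by_cases h64 : u = "JMC"
  · subst h64; decide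
  by_cases h65 : u = "B8H"
  · subst h65; decide
  rw [mcsMB_eq]
  simp [mcsAltTable, PySem.Dict.getD_eq_get?_getD, PySem.Dict.get?, List.find?, h1, h2, h3, h4, h5, h6, h7, h8, h9, h10, h11, h12, h13, h14, h15, h16, h17, h18, h19, h20, h21, h22, h23, h24, h25, h26, h27, h28, h29, h30, h31, h32, h33, h34, h35, h36, h37, h38, h39, h40, h41, h42, h43, h44, h45, h46, h47, h48, h49, h50, h51, h52, h53, h54, h55, h56, h57, h58, h59, h60, h61, h62, h63, h64, h65,
    beq_eq_false_iff_ne.mpr (Ne.symm h1),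
    beq_eq_false_iff_ne.mpr (Ne.symm h2),
    beq_eq_false_iff_ne.mpr (Ne.symm h3),
    beq_eq_false_iff_ne.mpr (Ne.symm h4),
    beq_eq_false_iff_ne.mpr (Ne.symm h5),
    beq_eq_false_iff_ne.mpr (Ne.symm h6),
    beq_eq_false_iff_ne.mpr (Ne.symm h7),
    beq_eq_false_iff_ne.mpr (Ne.symm h8),
    beq_eq_false_iff_ne.mpr (Ne.symm h9),
    beq_eq_false_iff_ne.mpr (Ne.symm h10),
    beq_eq_false_iff_ne.mpr (Ne.symm h11),
    beq_eq_false_iff_ne.mpr (Ne.symm h12),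
    beq_eq_false_iff_ne.mpr (Ne.symm h13),
    beq_eq_false_iff_ne.mpr (Ne.symm h14),
    beq_eq_false_iff_ne.mpr (Ne.symm h15),
    beq_eq_false_iff_ne.mpr (Ne.symm h16),
    beq_eq_false_iff_ne.mpr (Ne.symm h17),
    beq_eq_false_iff_ne.mpr (Ne.symm h18),
    beq_eq_false_iff_ne.mpr (Ne.symm h19),
    beq_eq_false_iff_ne.mpr (Ne.symm h20),
    beq_eq_false_iff_ne.mpr (Ne.symm h21),
    beq_eq_false_iff_ne.mpr (Ne.symm h22),
    beq_eq_false_iff_ne.mpr (Ne.symm h23),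
    beq_eq_false_iff_ne.mpr (Ne.symm h24),
    beq_eq_false_iff_ne.mpr (Ne.symm h25),
    beq_eq_false_iff_ne.mpr (Ne.symm h26),
    beq_eq_false_iff_ne.mpr (Ne.symm h27),
    beq_eq_false_iff_ne.mpr (Ne.symm h28),
    beq_eq_false_iff_ne.mpr (Ne.symm h29),
    beq_eq_false_iff_ne.mpr (Ne.symm h30),
    beq_eq_false_iff_ne.mpr (Ne.symm h31),
    beq_eq_false_iff_ne.mpr (Ne.symm h32),
    beq_eq_false_iff_ne.mpr (Ne.symm h33),
    beq_eq_false_iff_ne.mpr (Ne.symm h34),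
    beq_eq_false_iff_ne.mpr (Ne.symm h35),
    beq_eq_false_iff_ne.mpr (Ne.symm h36),
    beq_eq_false_iff_ne.mpr (Ne.symm h37),
    beq_eq_false_iff_ne.mpr (Ne.symm h38),
    beq_eq_false_iff_ne.mpr (Ne.symm h39),
    beq_eq_false_iff_ne.mpr (Ne.symm h40),
    beq_eq_false_iff_ne.mpr (Ne.symm h41),
    beq_eq_false_iff_ne.mpr (Ne.symm h42),
    beq_eq_false_iff_ne.mpr (Ne.symm h43),
    beq_eq_false_iff_ne.mpr (Ne.symm h44),
    beq_eq_false_iff_ne.mpr (Ne.symm h45),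
    beq_eq_false_iff_ne.mpr (Ne.symm h46),
    beq_eq_false_iff_ne.mpr (Ne.symm h47),
    beq_eq_false_iff_ne.mpr (Ne.symm h48),
    beq_eq_false_iff_ne.mpr (Ne.symm h49),
    beq_eq_false_iff_ne.mpr (Ne.symm h50),
    beq_eq_false_iff_ne.mpr (Ne.symm h51),
    beq_eq_false_iff_ne.mpr (Ne.symm h52),
    beq_eq_false_iff_ne.mpr (Ne.symm h53),
    beq_eq_false_iff_ne.mpr (Ne.symm h54),
    beq_eq_false_iff_ne.mpr (Ne.symm h55),
    beq_eq_false_iff_ne.mpr (Ne.symm h56),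
    beq_eq_false_iff_ne.mpr (Ne.symm h57),
    beq_eq_false_iff_ne.mpr (Ne.symm h58),
    beq_eq_false_iff_ne.mpr (Ne.symm h59),
    beq_eq_false_iff_ne.mpr (Ne.symm h60),
    beq_eq_false_iff_ne.mpr (Ne.symm h61),
    beq_eq_false_iff_ne.mpr (Ne.symm h62),
    beq_eq_false_iff_ne.mpr (Ne.symm h63),
    beq_eq_false_iff_ne.mpr (Ne.symm h64),
    beq_eq_false_iff_ne.mpr (Ne.symm h65)]

theorem mcsAltCanon_eq (name : String) : mcsAltCanon name = mcsBase name := by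
  rw [mcsAltCanon, mcsBase, mcsAltLookup_eq]

-- names grouped at position p, converted
def mcsCp (L : List (Int × String)) (p : Int) : List String :=
  (L.filter (fun q => q.1 == p)).map (fun q => mcsBase q.2)

-- A's loop, restructured per position (proof-side only)
def mcsAgo (L : List (Int × String)) : Nat → Int → (List String × Int) → (List String × Int)
  | 0, _, st => st
  | n+1, a, st =>
      if mcsCp L a = [] then mcsAgo L n (a+1) st
      else mcsAgo L n (a+1)
        ((if a - st.2 - 1 > 0 then st.1 ++ [mcsDashes (a - st.2 - 1)] else st.1) ++ mcsCp L a, a)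

def mcsFlat (xs : List String) : List Char := (xs.map String.toList).flatten

theorem mcsFlat_append (xs ys : List String) : mcsFlat (xs ++ ys) = mcsFlat xs ++ mcsFlat ys := by
  simp [mcsFlat]

theorem mcsFlat_gap (s : List String) (g : Int) (hg : 0 ≤ g) :
    mcsFlat (if g > 0 then s ++ [mcsDashes g] else s) = mcsFlat s ++ List.replicate g.toNat '-' := by
  by_cases h : g > 0
  · simp [h, mcsFlat, mcsDashes]
  · have hz : g = 0 := by omega
    simp [h, hz]

-- stability of insertBy into a key-sorted list
theorem mcs_filter_insertBy (p : Int) (x : Int × String) :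
    ∀ ys : List (Int × String), ys.Pairwise (fun a b => a.1 ≤ b.1) →
    (PySem.List.insertBy (fun a b => decide (a.1 < b.1)) x ys).filter (fun q => q.1 == p)
      = ys.filter (fun q => q.1 == p) ++ (if x.1 == p then [x] else []) := by
  intro ys
  induction ys with
  | nil =>
    intro _
    rw [PySem.List.insertBy]
    by_cases hxp : x.1 = p <;> simp [hxp]
  | cons y t ih =>
    intro hp
    rw [List.pairwise_cons] at hp
    rw [PySem.List.insertBy]
    by_cases hlt : x.1 < y.1
    · simp only [hlt, decide_true, if_true]
      by_cases hxp : x.1 = p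
      · have hyt : (y :: t).filter (fun q => q.1 == p) = [] := by
          rw [List.filter_eq_nil_iff]
          intro q hq
          rcases List.mem_cons.mp hq with h | hq
          · simp [h]; omega
          · have := hp.1 q hq; simp; omega
        rw [List.filter_cons]
        have hx : ((x.1 == p) : Bool) = true := by simpa using hxp
        simp only [hx, if_pos, hyt]
        simp [hxp]
      · have hx : ((x.1 == p) : Bool) = false := by simpa using hxp
        simp [List.filter_cons, hx]
    · simp only [hlt, decide_false, Bool.false_eq_true, if_false]
      rw [List.filter_cons, List.filter_cons, ih hp.2]
      by_cases hyp : y.1 = p <;> simp [hyp]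

-- stability of A's sort: the per-key filters are those of the unsorted list
theorem mcs_filter_sorted (L : List (Int × String)) (p : Int) :
    (PySem.List.sorted L (fun x => x.1) false).filter (fun q => q.1 == p)
      = L.filter (fun q => q.1 == p) := by
  induction L using List.reverseRecOn with
  | nil => rfl
  | append_singleton t x ih =>
    have hs : PySem.List.sorted (t ++ [x]) (fun q => q.1) false
        = PySem.List.insertBy (fun a b => decide (a.1 < b.1)) x
            (PySem.List.sorted t (fun q => q.1) false) := by
      rw [PySem.List.sorted_eq_foldl_insertBy, PySem.List.sorted_eq_foldl_insertBy,
        List.foldl_append]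
      rfl
    rw [hs, mcs_filter_insertBy p x _ (PySem.List.sorted_pairwise t (fun q => q.1)), ih,
      List.filter_append]
    by_cases hxp : x.1 = p <;> simp [hxp]

-- a key-sorted list splits as (elements at the minimum key) ++ (the rest)
theorem mcs_split_min (a : Int) :
    ∀ ys : List (Int × String), ys.Pairwise (fun u v => u.1 ≤ v.1) → (∀ q ∈ ys, a ≤ q.1) →
    ys = ys.filter (fun q => q.1 == a) ++ ys.filter (fun q => !(q.1 == a)) := by
  intro ys
  induction ys with
  | nil => intro _ _; rfl
  | cons y t ih =>
    intro hp hb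
    rw [List.pairwise_cons] at hp
    by_cases hya : y.1 = a
    · rw [List.filter_cons, List.filter_cons]
      simp only [hya, BEq.rfl, if_pos, Bool.not_true, Bool.false_eq_true, if_false]
      have := ih hp.2 (fun q hq => hb q (List.mem_cons_of_mem y hq))
      exact congrArg (y :: ·) this |>.trans (by simp)
    · have hgt : ∀ q ∈ t, a < q.1 := by
        intro q hq
        have h1 := hp.1 q hq
        have h2 := hb y (List.mem_cons_self)
        omega
      have h1 : (y :: t).filter (fun q => q.1 == a) = [] := by
        rw [List.filter_eq_nil_iff]
        intro q hq
        rcases List.mem_cons.mp hq with h | hq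
        · simp [h, hya]
        · have := hgt q hq; simp; omega
      have h2 : (y :: t).filter (fun q => !(q.1 == a)) = y :: t := by
        rw [List.filter_eq_self]
        intro q hq
        rcases List.mem_cons.mp hq with h | hq
        · simp [h, hya]
        · have := hgt q hq; simp; omega
      rw [h1, h2, List.nil_append]

-- a key-sorted list with keys in [a, a+n) is the concatenation of its per-key filters
theorem mcs_flat_range (n : Nat) : ∀ (a : Int) (ys : List (Int × String)),
    ys.Pairwise (fun u v => u.1 ≤ v.1) → (∀ q ∈ ys, a ≤ q.1 ∧ q.1 < a + n) →
    (PySem.List.pyRange a (a + n)).flatMap (fun p => ys.filter (fun q => q.1 == p)) = ys := by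
  induction n with
  | zero =>
    intro a ys _ hb
    have h2 : ys = [] := by
      cases ys with
      | nil => rfl
      | cons q t => exact absurd (hb q List.mem_cons_self) (by push_cast; omega)
    simp [h2]
  | succ n ih =>
    intro a ys hp hb
    have hcons : PySem.List.pyRange a (a + (n+1 : Nat)) = a :: PySem.List.pyRange (a+1) (a + (n+1 : Nat)) :=
      PySem.List.pyRange_one_cons (by push_cast; omega)
    rw [hcons, List.flatMap_cons]
    have hsplit := mcs_split_min a ys hp (fun q hq => (hb q hq).1)
    set ys' := ys.filter (fun q => !(q.1 == a)) with hys'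
    have htail : (PySem.List.pyRange (a+1) (a + (n+1 : Nat))).flatMap
        (fun p => ys.filter (fun q => q.1 == p)) = ys' := by
      have hc : ∀ p ∈ PySem.List.pyRange (a+1) (a + (n+1 : Nat)),
          ys.filter (fun q => q.1 == p) = ys'.filter (fun q => q.1 == p) := by
        intro p hpmem
        rw [PySem.List.mem_pyRange_one] at hpmem
        rw [hys', List.filter_filter]
        apply List.filter_congr
        intro q hq
        by_cases h : q.1 = p <;> simp [h] <;> omega
      rw [List.flatMap_congr hc]
      have ha : a + ((n+1 : Nat) : Int) = (a + 1) + (n : Nat) := by push_cast; omega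
      rw [ha]
      apply ih
      · exact List.Pairwise.sublist List.filter_sublist hp
      · intro q hq
        rw [hys', List.mem_filter] at hq
        have := (hb q hq.1)
        have hne : ¬(q.1 = a) := by simpa using hq.2
        push_cast at this ⊢
        omega
    rw [htail, ← hsplit]

-- A's fold over a constant-key block, tail part (prev already = p)
theorem mcs_foldl_block_tail (p : Int) :
    ∀ (ws : List (Int × String)), (∀ q ∈ ws, q.1 = p) → ∀ s,
    ws.foldl mcsStep (s, p) = (s ++ ws.map (fun q => mcsBase q.2), p) := by
  intro ws
  induction ws with
  | nil => intro _ s; simp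
  | cons w t ih =>
    intro hk s
    have hw : w.1 = p := hk w List.mem_cons_self
    rw [List.foldl_cons]
    have hstep : mcsStep (s, p) w = (s ++ [mcsBase w.2], p) := by
      simp [mcsStep, mcsBase, hw]
    rw [hstep, ih (fun q hq => hk q (List.mem_cons_of_mem w hq))]
    simp

-- A's fold over a nonempty constant-key block
theorem mcs_foldl_block (p : Int) (ws : List (Int × String)) (hne : ws ≠ [])
    (hk : ∀ q ∈ ws, q.1 = p) (s : List String) (prev : Int) :
    ws.foldl mcsStep (s, prev)
      = ((if p - prev - 1 > 0 then s ++ [mcsDashes (p - prev - 1)] else s)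
          ++ ws.map (fun q => mcsBase q.2), p) := by
  cases ws with
  | nil => exact absurd rfl hne
  | cons w t =>
    have hw : w.1 = p := hk w List.mem_cons_self
    rw [List.foldl_cons]
    have hstep : mcsStep (s, prev) w
        = ((if p - prev - 1 > 0 then s ++ [mcsDashes (p - prev - 1)] else s) ++ [mcsBase w.2], p) := by
      simp [mcsStep, mcsBase, hw]
    rw [hstep, mcs_foldl_block_tail p t (fun q hq => hk q (List.mem_cons_of_mem w hq))]
    simp

-- A's fold over the per-position decomposition is mcsAgo
theorem mcs_foldl_flat (L : List (Int × String)) (n : Nat) : ∀ (a : Int) (st : List String × Int),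
    ((PySem.List.pyRange a (a + n)).flatMap (fun p => L.filter (fun q => q.1 == p))).foldl mcsStep st
      = mcsAgo L n a st := by
  induction n with
  | zero =>
    intro a st
    simp [mcsAgo]
  | succ n ih =>
    intro a st
    have hcons : PySem.List.pyRange a (a + (n+1 : Nat)) = a :: PySem.List.pyRange (a+1) (a + (n+1 : Nat)) :=
      PySem.List.pyRange_one_cons (by push_cast; omega)
    have harith : a + ((n+1 : Nat) : Int) = (a + 1) + (n : Nat) := by push_cast; omega
    rw [hcons, List.flatMap_cons, List.foldl_append, harith]
    by_cases h : mcsCp L a = []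
    · have hf : L.filter (fun q => q.1 == a) = [] := by
        have h' := h
        rw [mcsCp, List.map_eq_nil_iff] at h'
        exact h'
      rw [hf]
      rw [mcsAgo]
      simp only [h, if_pos]
      rw [← ih (a+1) st]
      rfl
    · have hf : L.filter (fun q => q.1 == a) ≠ [] := by
        intro hc
        apply h
        rw [mcsCp, hc]
        rfl
      obtain ⟨s, prev⟩ := st
      rw [mcs_foldl_block a _ hf (fun q hq => by simpa using (List.mem_filter.mp hq).2) s prev]
      rw [mcsAgo]
      simp only [h, if_false]
      rw [← ih (a+1) _]
      rfl

-- the central comparison: A's lazily-emitted dash runs equal B's per-position dashes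
theorem mcs_main (L : List (Int × String)) : ∀ (n : Nat) (a prev : Int) (s : List String),
    1 ≤ n → mcsCp L (a + n - 1) ≠ [] → prev < a →
    mcsFlat (mcsAgo L n a (s, prev)).1
      = mcsFlat s ++ List.replicate (a - 1 - prev).toNat '-'
          ++ mcsFlat ((PySem.List.pyRange a (a + n)).flatMap
                (fun p => if mcsCp L p = [] then ["-"] else mcsCp L p)) := by
  intro n
  induction n with
  | zero => intro a prev s h1; omega
  | succ n ih =>
    intro a prev s _ hlast hprev
    have hcons : PySem.List.pyRange a (a + (n+1 : Nat)) = a :: PySem.List.pyRange (a+1) (a + (n+1 : Nat)) :=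
      PySem.List.pyRange_one_cons (by push_cast; omega)
    have harith : a + ((n+1 : Nat) : Int) = (a + 1) + (n : Nat) := by push_cast; omega
    rw [hcons, List.flatMap_cons, mcsFlat_append]
    rcases Nat.eq_zero_or_pos n with hn0 | hnpos
    · subst hn0
      have hne : mcsCp L a ≠ [] := by
        have hx : a + ((0+1 : Nat) : Int) - 1 = a := by push_cast; omega
        rwa [hx] at hlast
      rw [mcsAgo]
      simp only [hne, if_false]
      rw [mcsAgo]
      have hr0 : PySem.List.pyRange (a+1) (a + ((0+1:Nat):Int)) = [] := by
        apply List.eq_nil_iff_forall_not_mem.mpr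
        intro x hx
        rw [PySem.List.mem_pyRange_one] at hx
        push_cast at hx
        omega
      rw [hr0]
      simp only [hne, List.flatMap_nil, if_false]
      rw [mcsFlat_append, mcsFlat_gap s _ (by omega)]
      have hx : a - prev - 1 = a - 1 - prev := by ring
      rw [hx]
      simp [mcsFlat]
    · have hlast' : mcsCp L ((a+1) + (n:Nat) - 1) ≠ [] := by
        have hx : (a+1) + ((n:Nat):Int) - 1 = a + ((n+1:Nat):Int) - 1 := by push_cast; omega
        rwa [hx]
      by_cases h : mcsCp L a = []
      · rw [mcsAgo]
        simp only [h, if_pos]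
        rw [ih (a+1) prev s hnpos hlast' (by omega), harith]
        have hrep : List.replicate ((a+1) - 1 - prev).toNat '-'
            = List.replicate (a - 1 - prev).toNat '-' ++ ['-'] := by
          have h1 : ((a+1) - 1 - prev).toNat = (a - 1 - prev).toNat + 1 := by omega
          rw [h1, List.replicate_succ']
        rw [hrep]
        simp [h, mcsFlat, List.append_assoc]
      · rw [mcsAgo]
        simp only [h, if_false]
        rw [ih (a+1) a _ hnpos hlast' (by omega), harith]
        have hz : ((a+1) - 1 - a).toNat = 0 := by omega
        rw [hz]
        rw [mcsFlat_append, mcsFlat_gap s _ (by omega)]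
        have hx : a - prev - 1 = a - 1 - prev := by ring
        rw [hx]
        simp [h, List.append_assoc]

theorem mcs_join_flat (xs : List String) :
    PySem.Str.join "" xs = String.ofList (mcsFlat xs) := by
  match xs with
  | [] => rfl
  | [a] => simp [PySem.Str.join, PySem.Chars.join_singleton, mcsFlat]
  | a :: b :: t =>
    have ih := mcs_join_flat (b :: t)
    have ih' : PySem.Chars.join "".toList (String.toList b :: t.map String.toList)
        = ((b :: t).map String.toList).flatten := by
      have hc := congrArg String.toList ih
      simpa [PySem.Str.join, String.toList_ofList, mcsFlat] using hc
    simp only [PySem.Str.join, mcsFlat, List.map_cons, List.flatten_cons]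
    rw [show ("".toList : List Char) = [] from rfl] at *
    rw [PySem.Chars.join_cons_cons]
    simp [ih']

theorem mcsCp_eq_nil_iff (L : List (Int × String)) (p : Int) :
    mcsCp L p = [] ↔ p ∉ L.map (fun q => q.1) := by
  rw [mcsCp, List.map_eq_nil_iff, List.filter_eq_nil_iff]
  simp only [List.mem_map]
  constructor
  · rintro h ⟨q, hq, rfl⟩
    exact h q hq (by simp)
  · rintro h q hq hqp
    exact h ⟨q, hq, by simpa using hqp⟩

-- ===== VERDICT (by name: the statement is the Claim_ definition above) =====
set_option maxRecDepth 4096 in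
theorem make_canonical_seq_spec : Claim_equal_make_canonical_seq := by
  intro res_nums res_names _
  unfold Spec_make_canonical_seq
  by_cases hg : res_nums = [] ∨ res_names = []
  · simp [make_canonical_seq, make_canonical_seq_alt, hg]
  · push_neg at hg
    set L := res_nums.zip res_names with hLdef
    have hL : L ≠ [] := by
      rw [hLdef, Ne, List.zip_eq_nil_iff]
      push_neg
      exact hg
    -- the groups dict
    set groups := L.foldl (fun (d : PySem.Dict Int (List String)) x =>
        d.modify x.1 [] (· ++ [x.2])) PySem.Dict.empty with hgroups
    have hkeys : groups.keys = PySem.Set.ofList (L.map (fun q => q.1)) := by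
      rw [hgroups, PySem.Dict.keys_foldl_modify_key L (fun q => q.1) []
        (fun _ x => (· ++ [x.2])) PySem.Dict.empty, PySem.Dict.keys_empty,
        PySem.Set.update_nil_left]
    have hgetD : ∀ p, groups.getD p [] = (L.filter (fun q => q.1 == p)).map (fun q => q.2) := by
      intro p
      rw [hgroups, PySem.Dict.getD_foldl_modify_append L PySem.Dict.empty p,
        PySem.Dict.getD_empty, List.nil_append]
    have hmem : ∀ p, p ∈ groups.keys ↔ p ∈ L.map (fun q => q.1) := by
      intro p
      rw [hkeys, PySem.Set.mem_ofList]
    -- keys are nonempty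
    obtain ⟨q0, hq0⟩ := List.exists_mem_of_ne_nil L hL
    have hkne : groups.keys ≠ [] := by
      intro hc
      have := (hmem q0.1).mpr (List.mem_map_of_mem hq0)
      simp [hc] at this
    -- lo and hi
    obtain ⟨m, hmin⟩ : ∃ m, PySem.List.min? groups.keys (fun k => k) = some m := by
      cases hx : PySem.List.min? groups.keys (fun k => k) with
      | none => exact absurd ((PySem.List.min?_eq_none_iff _ _).mp hx) hkne
      | some m => exact ⟨m, rfl⟩
    obtain ⟨M, hmax⟩ : ∃ M, PySem.List.max? groups.keys (fun k => k) = some M := by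
      cases hx : PySem.List.max? groups.keys (fun k => k) with
      | none => exact absurd ((PySem.List.max?_eq_none_iff _ _).mp hx) hkne
      | some M => exact ⟨M, rfl⟩
    have hmmem : m ∈ L.map (fun q => q.1) := (hmem m).mp (PySem.List.min?_mem hmin)
    have hMmem : M ∈ L.map (fun q => q.1) := (hmem M).mp (PySem.List.max?_mem hmax)
    have hlow : ∀ q ∈ L, m ≤ q.1 := by
      intro q hq
      exact PySem.List.min?_isMin hmin q.1 ((hmem q.1).mpr (List.mem_map_of_mem hq))
    have hhigh : ∀ q ∈ L, q.1 ≤ M := by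
      intro q hq
      exact PySem.List.max?_isMax hmax q.1 ((hmem q.1).mpr (List.mem_map_of_mem hq))
    have hmM : m ≤ M := by
      obtain ⟨q, hq, rfl⟩ := List.mem_map.mp hmmem
      exact hlow q hq |>.trans (hhigh q hq) |>.trans (le_refl _) |>.trans (le_refl _)
    set n : Nat := (M + 1 - m).toNat with hn
    have hnval : m + (n : Int) = M + 1 := by omega
    have hn1 : 1 ≤ n := by omega
    -- the per-position emission function
    set g : Int → List String := fun p => if mcsCp L p = [] then ["-"] else mcsCp L p with hgdef
    -- ===== the A side =====
    have hAside : make_canonical_seq res_nums res_names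
        = String.ofList (mcsFlat ((PySem.List.pyRange m (m + n)).flatMap g)) := by
      rw [make_canonical_seq, if_neg (by rintro (h|h) <;> [exact hg.1 h; exact hg.2 h])]
      simp only [← hLdef]
      -- the sorted list
      set pairs := PySem.List.sorted L (fun x => x.1) false with hpairs
      have hpne : pairs ≠ [] := by
        rw [hpairs, Ne, PySem.List.sorted_eq_nil_iff]
        exact hL
      obtain ⟨hd, tl, hht⟩ := List.exists_cons_of_ne_nil hpne
      have hhd1 : hd.1 = m := by
        have hle : ∀ y ∈ L, hd.1 ≤ y.1 := by
          intro y hy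
          exact PySem.List.key_head_sorted_le L (fun x => x.1) (hpairs ▸ hht) y hy
        have hdL : hd ∈ L := (PySem.List.mem_sorted L _ false hd).mp
          (by rw [← hpairs, hht]; exact List.mem_cons_self)
        have hdm : m ≤ hd.1 := hlow hd hdL
        obtain ⟨q, hq, hqm⟩ := List.mem_map.mp hmmem
        have h2 := hle q hq
        omega
      have hprev0 : (PySem.List.pyGetD pairs 0 (0, "")).1 - 1 = m - 1 := by
        rw [hht, PySem.List.pyGetD_zero_cons, hhd1]
      rw [hprev0]
      -- decompose the sorted list into per-position blocks
      have hdecomp : pairs = (PySem.List.pyRange m (m + n)).flatMap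
          (fun p => L.filter (fun q => q.1 == p)) := by
        have h1 : (PySem.List.pyRange m (m + n)).flatMap
            (fun p => pairs.filter (fun q => q.1 == p)) = pairs := by
          apply mcs_flat_range n m pairs (hpairs ▸ PySem.List.sorted_pairwise L (fun x => x.1))
          intro q hq
          have hqL : q ∈ L := (PySem.List.mem_sorted L _ false q).mp (hpairs ▸ hq)
          have := hlow q hqL
          have := hhigh q hqL
          omega
        rw [← h1]
        apply List.flatMap_congr
        intro p _
        rw [hpairs, mcs_filter_sorted]
      rw [hdecomp, mcs_foldl_flat L n m ([], m - 1)]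
      have hM1 : mcsCp L (m + n - 1) ≠ [] := by
        have hx : m + (n : Int) - 1 = M := by omega
        rw [hx]
        rw [Ne, mcsCp_eq_nil_iff]
        simpa using hMmem
      have := mcs_main L n m (m - 1) [] hn1 hM1 (by omega)
      rw [mcs_join_flat, this]
      have hz : (m - 1 - (m - 1)).toNat = 0 := by omega
      rw [hz]
      simp [mcsFlat, hgdef]
    -- ===== the B side =====
    have hBside : make_canonical_seq_alt res_nums res_names
        = String.ofList (mcsFlat ((PySem.List.pyRange m (m + n)).flatMap g)) := by
      rw [make_canonical_seq_alt, if_neg (by rintro (h|h) <;> [exact hg.1 h; exact hg.2 h])]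
      simp only [← hLdef, ← hgroups, hmin, hmax, Option.getD_some]
      have hrange : PySem.List.pyRange m (M + 1) 1 = PySem.List.pyRange m (m + n) := by
        rw [hnval]
      rw [hrange]
      have hbody : (PySem.List.pyRange m (m + n)).foldl
          (fun acc p => if groups.contains p then
              acc ++ (groups.getD p []).map (fun name => mcsAltCanon name)
            else acc ++ ["-"]) []
        = (PySem.List.pyRange m (m + n)).foldl (fun acc p => acc ++ g p) [] := by
        apply PySem.List.foldl_congr_mem
        intro acc p _
        by_cases hc : mcsCp L p = []
        · have hnc : groups.contains p = false := by
            rw [← Bool.not_eq_true, PySem.Dict.contains_iff_mem_keys, hmem]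
            exact (mcsCp_eq_nil_iff L p).mp hc
          rw [hnc, if_neg (by simp)]
          show acc ++ ["-"] = acc ++ (if mcsCp L p = [] then ["-"] else mcsCp L p)
          rw [if_pos hc]
        · have hcc : groups.contains p = true := by
            rw [PySem.Dict.contains_iff_mem_keys, hmem]
            by_contra hx
            exact hc ((mcsCp_eq_nil_iff L p).mpr hx)
          rw [hcc, if_pos rfl]
          show acc ++ (groups.getD p []).map (fun name => mcsAltCanon name)
              = acc ++ (if mcsCp L p = [] then ["-"] else mcsCp L p)
          rw [if_neg hc, hgetD p, List.map_map]
          simp [mcsCp, mcsAltCanon_eq, Function.comp_def]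
      rw [hbody, PySem.List.foldl_append_eq_flatMap g _ [], List.nil_append, mcs_join_flat]
    rw [hAside, hBside]
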